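-- pv_equiv track=rewrite | github.com/aloix123/Korepetycje | matura2017/zad4.py | zad1
-- ===== SOURCE A (Python) =====
-- def zad1(pixels):
--     mostshiny=0
--     leastshiny=266
--     for element in pixels:
--         for piece in element:
--             if piece>mostshiny:
--                 mostshiny=piece
--             if leastshiny>piece:
--                 leastshiny=piece
--     return mostshiny,leastshiny
-- ===== SOURCE B (Python) =====
-- def zad1(pixels):
--     flat = [p for row in pixels for p in row]
--     return max([0] + flat), min([266] + flat)
-- ===== Notes on version B (the rewrite author's own statement) =====
-- stated objective: simpler
-- what changed: Replaces A's single fused loop that maintains two mutable extremes with a flatten step plus two independent built-in max/min scans seeded with A's initial values 0 and 266.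
import Mathlib
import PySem

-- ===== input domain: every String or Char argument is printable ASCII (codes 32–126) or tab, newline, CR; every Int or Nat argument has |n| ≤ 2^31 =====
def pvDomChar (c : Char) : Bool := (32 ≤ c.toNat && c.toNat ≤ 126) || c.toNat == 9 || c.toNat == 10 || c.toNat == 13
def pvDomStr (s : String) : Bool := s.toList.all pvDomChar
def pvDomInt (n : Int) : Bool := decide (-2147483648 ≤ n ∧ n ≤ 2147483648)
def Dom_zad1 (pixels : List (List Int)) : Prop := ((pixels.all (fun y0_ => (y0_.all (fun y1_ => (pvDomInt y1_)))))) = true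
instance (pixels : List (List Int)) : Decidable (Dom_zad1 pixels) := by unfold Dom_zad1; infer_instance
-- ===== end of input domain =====

-- B flattens the rows and takes two independent built-in max/min scans (seeded with
-- A's initial values 0 and 266) instead of A's single fused two-accumulator loop; simpler.

-- ===== PORT A =====
def zad1 (pixels : List (List Int)) : Int × Int :=
  let st := pixels.foldl
    (fun st element =>
      element.foldl
        (fun st piece =>
          let most := if piece > st.1 then piece else st.1
          let least := if st.2 > piece then piece else st.2
          (most, least))
        st)
    (0, 266)
  (st.1, st.2)

-- ===== PORT B =====
def zad1_alt (pixels : List (List Int)) : Int × Int :=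
  let flat := pixels.flatMap (fun row => row)
  (((0 : Int) :: flat).foldl max 0, ((266 : Int) :: flat).foldl min 266)

-- ===== PRECONDITION & SPEC =====
def Spec_zad1 (pixels : List (List Int)) (out : Int × Int) : Prop := out = zad1_alt pixels
instance (pixels : List (List Int)) (out : Int × Int) : Decidable (Spec_zad1 pixels out) := by unfold Spec_zad1; infer_instance

-- ===== CLAIM (what is proved, stated in full; the proofs are below) =====
def Claim_equal_zad1 : Prop := ∀ (pixels : List (List Int)), Dom_zad1 pixels → Spec_zad1 pixels (zad1 pixels)

-- ===== LEMMAS AND PROOFS =====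

theorem zad1_inner (l : List Int) (m0 l0 : Int) :
    l.foldl
      (fun st piece =>
        let most := if piece > st.1 then piece else st.1
        let least := if st.2 > piece then piece else st.2
        (most, least))
      (m0, l0) = (l.foldl max m0, l.foldl min l0) := by
  induction l generalizing m0 l0 with
  | nil => rfl
  | cons p t ih =>
      simp only [List.foldl_cons]
      rw [ih]
      congr 1 <;> congr 1 <;> simp [max_def, min_def] <;> omega

theorem zad1_outer (pixels : List (List Int)) (m0 l0 : Int) :
    pixels.foldl
      (fun st element =>
        element.foldl
          (fun st piece =>
            let most := if piece > st.1 then piece else st.1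
            let least := if st.2 > piece then piece else st.2
            (most, least))
          st)
      (m0, l0)
    = ((pixels.flatMap (fun row => row)).foldl max m0,
       (pixels.flatMap (fun row => row)).foldl min l0) := by
  induction pixels generalizing m0 l0 with
  | nil => rfl
  | cons r t ih =>
      simp only [List.foldl_cons, List.flatMap_cons, List.foldl_append]
      rw [zad1_inner, ih]

-- ===== VERDICT (by name: the statement is the Claim_ definition above) =====
theorem zad1_spec : Claim_equal_zad1 := by
  intro pixels _
  show zad1 pixels = zad1_alt pixels
  simp only [zad1, zad1_alt, List.foldl_cons, max_self, min_self]
  rw [zad1_outer]
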